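-- pv_equiv track=rewrite | github.com/ccc2223/Castle-Defense | ui/utils/resource_formatter.py | sort_resources
-- ===== SOURCE A (Python) =====
-- RESOURCE_DISPLAY_ORDER = [
--     "Monster Coins",
--     "Stone",
--     "Iron",
--     "Copper",
--     "Thorium",
--     "Force Core",
--     "Spirit Core",
--     "Magic Core",
--     "Void Core",
--     "Unstoppable Force",
--     "Serene Spirit",
--     "Multitudation Vortex"
-- ]
--
-- def sort_resources(resource_dict):
--     """
--     Sort resources according to standard order
--
--     Args:
--         resource_dict: Dictionary mapping resource types to amounts
--
--     Returns:
--         List of (resource_type, amount) tuples in standard order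
--     """
--     sorted_resources = []
--
--     # Add resources in standard order
--     for resource in RESOURCE_DISPLAY_ORDER:
--         if resource in resource_dict:
--             sorted_resources.append((resource, resource_dict[resource]))
--
--     # Add any resources not in the standard order
--     for resource, amount in resource_dict.items():
--         if resource not in RESOURCE_DISPLAY_ORDER:
--             sorted_resources.append((resource, amount))
--
--     return sorted_resources
-- ===== SOURCE B (Python) =====
-- RESOURCE_DISPLAY_ORDER = [
--     "Monster Coins",
--     "Stone",
--     "Iron",
--     "Copper",
--     "Thorium",
--     "Force Core",
--     "Spirit Core",
--     "Magic Core",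
--     "Void Core",
--     "Unstoppable Force",
--     "Serene Spirit",
--     "Multitudation Vortex"
-- ]
--
--
-- def sort_resources(resource_dict):
--     """Bucket the dict's items by display-order index in a single pass."""
--     n = len(RESOURCE_DISPLAY_ORDER)
--     pos = {name: i for i, name in enumerate(RESOURCE_DISPLAY_ORDER)}
--     buckets = {}
--     for name, amount in resource_dict.items():
--         buckets.setdefault(pos.get(name, n), []).append((name, amount))
--     out = []
--     for i in range(n + 1):
--         out.extend(buckets.get(i, []))
--     return out
-- ===== Notes on version B (the rewrite author's own statement) =====
-- stated objective: alternative
-- what changed: Replaces A's two passes (a scan over the 12-name display order with dict lookups, then a scan over the dict testing each key's membership in the 12-name list) by a one-pass bucket grouping: an index dict built once maps each name to its display position, every item is appended to the bucket of its position (unknown names to a sentinel last bucket), and the buckets are concatenated in index order.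
import Mathlib
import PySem

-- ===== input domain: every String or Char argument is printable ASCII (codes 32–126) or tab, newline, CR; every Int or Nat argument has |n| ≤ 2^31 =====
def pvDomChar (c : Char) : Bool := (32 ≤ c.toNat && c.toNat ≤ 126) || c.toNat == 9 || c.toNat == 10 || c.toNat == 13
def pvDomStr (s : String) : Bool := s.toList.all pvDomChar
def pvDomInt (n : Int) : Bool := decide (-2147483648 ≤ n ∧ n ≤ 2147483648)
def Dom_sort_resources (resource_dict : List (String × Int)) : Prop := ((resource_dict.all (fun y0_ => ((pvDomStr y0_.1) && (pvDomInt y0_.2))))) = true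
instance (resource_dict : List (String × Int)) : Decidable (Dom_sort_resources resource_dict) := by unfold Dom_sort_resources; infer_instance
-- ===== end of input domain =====

-- B replaces A's two scans (display order with lookups, then dict with list-membership tests)
-- by a single pass grouping the items into buckets indexed via a position dict, then
-- concatenating the buckets; proved to return the same list on every duplicate-free input.

def RESOURCE_DISPLAY_ORDER : List String :=
  ["Monster Coins", "Stone", "Iron", "Copper", "Thorium", "Force Core",
   "Spirit Core", "Magic Core", "Void Core", "Unstoppable Force",
   "Serene Spirit", "Multitudation Vortex"]

-- ===== PORT A =====
-- 'resource in resource_dict' + 'resource_dict[resource]' = first-match lookup on the assoc list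
def sort_resources (resource_dict : List (String × Int)) : List (String × Int) :=
  let sorted_resources :=
    RESOURCE_DISPLAY_ORDER.foldl (fun acc resource =>
      match resource_dict.lookup resource with
      | some v => acc ++ [(resource, v)]
      | none => acc) []
  resource_dict.foldl (fun acc p =>
    if p.1 ∈ RESOURCE_DISPLAY_ORDER then acc else acc ++ [p]) sorted_resources

-- ===== PORT B =====
-- 'buckets.setdefault(k, []).append(x)' mutates buckets[k] = buckets.get(k, []) + [x] = Dict.modify k [] (· ++ [x])
def sort_resources_alt (resource_dict : List (String × Int)) : List (String × Int) :=
  let n : Int := (RESOURCE_DISPLAY_ORDER.length : Int)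
  let pos : PySem.Dict String Int :=
    (PySem.List.enumerate RESOURCE_DISPLAY_ORDER).foldl
      (fun d p => d.insert p.2 p.1) PySem.Dict.empty
  let buckets : PySem.Dict Int (List (String × Int)) :=
    resource_dict.foldl
      (fun d p => d.modify (pos.getD p.1 n) [] (· ++ [p])) PySem.Dict.empty
  (PySem.List.pyRange 0 (n + 1)).foldl (fun out i => out ++ buckets.getD i []) []

-- ===== PRECONDITION & SPEC =====
-- Pre_ excludes assoc lists with duplicate keys: they represent no Python dict (the
-- Python argument is a dict, whose keys are necessarily distinct), so nothing is excluded
-- that the Python A ever receives.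
def Pre_sort_resources (resource_dict : List (String × Int)) : Prop :=
  (resource_dict.map Prod.fst).Nodup
instance (resource_dict : List (String × Int)) : Decidable (Pre_sort_resources resource_dict) := by
  unfold Pre_sort_resources; infer_instance

def pvWitness_sort_resources : (List (String × Int)) := [("Gem", 7), ("Stone", 3)]

def Spec_sort_resources (resource_dict : List (String × Int)) (out : List (String × Int)) : Prop := out = sort_resources_alt resource_dict
instance (resource_dict : List (String × Int)) (out : List (String × Int)) : Decidable (Spec_sort_resources resource_dict out) := by unfold Spec_sort_resources; infer_instance

-- ===== CLAIM (what is proved, stated in full; the proofs are below) =====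
def Claim_equal_sort_resources : Prop := ∀ (resource_dict : List (String × Int)), Dom_sort_resources resource_dict → Pre_sort_resources resource_dict → Spec_sort_resources resource_dict (sort_resources resource_dict)

-- ===== LEMMAS AND PROOFS =====

-- B's position dict and its key function, named for the proofs
def dispPos : PySem.Dict String Int :=
  (PySem.List.enumerate RESOURCE_DISPLAY_ORDER).foldl
    (fun d p => d.insert p.2 p.1) PySem.Dict.empty

def dkey (s : String) : Int := dispPos.getD s 12

-- dispPos written as an insert chain (reduces by rfl)
theorem dispPos_eq : dispPos =
    (((((((((((PySem.Dict.empty.insert "Monster Coins" (0 : Int)).insert "Stone" 1).insert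
      "Iron" 2).insert "Copper" 3).insert "Thorium" 4).insert "Force Core" 5).insert
      "Spirit Core" 6).insert "Magic Core" 7).insert "Void Core" 8).insert
      "Unstoppable Force" 9).insert "Serene Spirit" 10).insert "Multitudation Vortex" 11 := by
  rfl

-- a name outside the display order gets the sentinel key 12
theorem dkey_of_not_mem {s : String} (h : s ∉ RESOURCE_DISPLAY_ORDER) : dkey s = 12 := by
  simp only [RESOURCE_DISPLAY_ORDER, List.mem_cons, List.not_mem_nil, or_false, not_or] at h
  obtain ⟨h1, h2, h3, h4, h5, h6, h7, h8, h9, h10, h11, h12⟩ := h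
  simp [dkey, dispPos_eq, PySem.Dict.getD_insert, h1, h2, h3, h4, h5, h6, h7, h8, h9, h10,
    h11, h12, PySem.Dict.getD_empty]

-- display names have keys < 12
theorem dkey_mem_ne_twelve : ∀ r ∈ RESOURCE_DISPLAY_ORDER, dkey r ≠ 12 := by decide

-- dkey is injective on the display list
theorem dkey_inj : ∀ r ∈ RESOURCE_DISPLAY_ORDER, ∀ s ∈ RESOURCE_DISPLAY_ORDER,
    dkey r = dkey s → r = s := by decide

-- the display list mapped through dkey is [0..11]
theorem map_dkey_display :
    RESOURCE_DISPLAY_ORDER.map dkey = [0, 1, 2, 3, 4, 5, 6, 7, 8, 9, 10, 11] := by decide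

-- comparing keys against the key of a display name is comparing names
theorem dkey_beq_of_mem {r : String} (hr : r ∈ RESOURCE_DISPLAY_ORDER) (s : String) :
    (dkey s == dkey r) = (s == r) := by
  by_cases hsr : s = r
  · simp [hsr]
  · by_cases hs : s ∈ RESOURCE_DISPLAY_ORDER
    · have : dkey s ≠ dkey r := fun h => hsr (dkey_inj s hs r hr h)
      simp [this, hsr]
    · have h12 : dkey s = 12 := dkey_of_not_mem hs
      have : dkey s ≠ dkey r := by
        rw [h12]; exact fun h => dkey_mem_ne_twelve r hr h.symm
      simp [this, hsr]

-- on a duplicate-free assoc list, filtering by a key is what lookup finds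
theorem filter_eq_lookup (r : String) :
    ∀ (d : List (String × Int)), (d.map Prod.fst).Nodup →
      d.filter (fun p => p.1 == r) =
        (match d.lookup r with | some v => [(r, v)] | none => []) := by
  intro d
  induction d with
  | nil => intro _; rfl
  | cons hd tl ih =>
    intro hnd
    obtain ⟨k, v⟩ := hd
    simp only [List.map_cons, List.nodup_cons, List.mem_map] at hnd
    obtain ⟨hk, hnd'⟩ := hnd
    by_cases hkr : k = r
    · subst hkr
      have htl : tl.filter (fun p => p.1 == k) = [] := by
        rw [List.filter_eq_nil_iff]
        intro p hp hpk
        exact hk ⟨p, hp, by simpa using hpk⟩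
      simp [List.lookup, htl]
    · have hrk : (r == k) = false := by simp [Ne.symm hkr]
      have hkv : ((k, v).1 == r) = false := by simp [hkr]
      simp only [List.filter_cons, List.lookup, hrk, hkv, Bool.false_eq_true,
        if_false]
      exact ih hnd'

-- B computes the concatenation of the per-key filters for keys 0..12
set_option maxHeartbeats 1000000 in
theorem alt_eq_flatMap (d : List (String × Int)) :
    sort_resources_alt d =
      ([0, 1, 2, 3, 4, 5, 6, 7, 8, 9, 10, 11, 12] : List Int).flatMap
        (fun i => d.filter (fun p => dkey p.1 == i)) := by
  simp only [sort_resources_alt]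
  rw [show (PySem.List.enumerate RESOURCE_DISPLAY_ORDER).foldl
      (fun d p => d.insert p.2 p.1) PySem.Dict.empty = dispPos from rfl]
  have hb : ∀ i : Int,
      (d.foldl (fun b p =>
        b.modify (dispPos.getD p.1 (RESOURCE_DISPLAY_ORDER.length : Int)) [] (· ++ [p]))
        PySem.Dict.empty).getD i [] = d.filter (fun p => dkey p.1 == i) := by
    intro i
    have hfold :
        d.foldl (fun b p =>
          b.modify (dispPos.getD p.1 (RESOURCE_DISPLAY_ORDER.length : Int)) [] (· ++ [p]))
          PySem.Dict.empty =
        (d.map (fun p => (dkey p.1, p))).foldl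
          (fun b q => b.modify q.1 [] (· ++ [q.2])) PySem.Dict.empty := by
      rw [List.foldl_map]
      rfl
    rw [hfold, PySem.Dict.getD_foldl_modify_append, List.filter_map, List.map_map]
    simp [Function.comp_def]
  have hr : PySem.List.pyRange 0 ((RESOURCE_DISPLAY_ORDER.length : Int) + 1) =
      ([0, 1, 2, 3, 4, 5, 6, 7, 8, 9, 10, 11, 12] : List Int) := by decide
  rw [hr, PySem.List.foldl_append_eq_flatMap]
  simp only [List.nil_append]
  exact List.flatMap_congr (fun i _ => hb i)

-- A computes the display-order filters followed by the unknown-name filter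
theorem a_eq_flatMap (d : List (String × Int)) (hnd : (d.map Prod.fst).Nodup) :
    sort_resources d =
      RESOURCE_DISPLAY_ORDER.flatMap (fun r => d.filter (fun p => p.1 == r)) ++
        d.filter (fun p => !decide (p.1 ∈ RESOURCE_DISPLAY_ORDER)) := by
  show d.foldl (fun acc p => if p.1 ∈ RESOURCE_DISPLAY_ORDER then acc else acc ++ [p])
      (RESOURCE_DISPLAY_ORDER.foldl (fun acc resource =>
        match d.lookup resource with
        | some v => acc ++ [(resource, v)]
        | none => acc) []) = _
  have h1 : (fun (acc : List (String × Int)) resource =>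
      match d.lookup resource with
      | some v => acc ++ [(resource, v)]
      | none => acc) =
      fun acc resource =>
        acc ++ (match d.lookup resource with | some v => [(resource, v)] | none => []) := by
    funext acc resource
    cases d.lookup resource <;> simp
  have h2 : (fun (acc : List (String × Int)) (p : String × Int) =>
      if p.1 ∈ RESOURCE_DISPLAY_ORDER then acc else acc ++ [p]) =
      fun acc p => if (!decide (p.1 ∈ RESOURCE_DISPLAY_ORDER)) = true then acc ++ [p] else acc := by
    funext acc p
    by_cases h : p.1 ∈ RESOURCE_DISPLAY_ORDER <;> simp [h]
  rw [h1, h2, PySem.List.foldl_append_eq_flatMap, PySem.List.foldl_append_if, List.map_id_fun']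
  simp only [List.nil_append]
  congr 1
  exact List.flatMap_congr (fun r hr => (filter_eq_lookup r d hnd).symm)

-- ===== VERDICT (by name: the statement is the Claim_ definition above) =====
theorem sort_resources_spec : Claim_equal_sort_resources := by
  intro d _ hnd
  unfold Spec_sort_resources
  rw [a_eq_flatMap d hnd, alt_eq_flatMap d]
  have hsplit :
      ([0, 1, 2, 3, 4, 5, 6, 7, 8, 9, 10, 11, 12] : List Int).flatMap
        (fun i => d.filter (fun p => dkey p.1 == i)) =
      ([0, 1, 2, 3, 4, 5, 6, 7, 8, 9, 10, 11] : List Int).flatMap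
        (fun i => d.filter (fun p => dkey p.1 == i)) ++
        d.filter (fun p => dkey p.1 == 12) := by
    have : ([0, 1, 2, 3, 4, 5, 6, 7, 8, 9, 10, 11, 12] : List Int) =
        [0, 1, 2, 3, 4, 5, 6, 7, 8, 9, 10, 11] ++ [12] := by decide
    rw [this, List.flatMap_append]
    simp
  rw [hsplit, ← map_dkey_display, List.flatMap_map]
  congr 1
  · exact (List.flatMap_congr (fun r hr =>
      List.filter_congr (fun p _ => dkey_beq_of_mem hr p.1))).symm
  · exact (List.filter_congr (fun p _ => by
      by_cases h : p.1 ∈ RESOURCE_DISPLAY_ORDER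
      · have := dkey_mem_ne_twelve p.1 h
        simp [h, this]
      · simp [h, dkey_of_not_mem h])).symm
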